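-- pv_equiv track=rewrite | github.com/Zaen1993/System-Updates | server/intelligence/network_scanner.py | analyze_scan_results
-- ===== SOURCE A (Python) =====
-- from typing import List, Dict, Optional
--
-- def analyze_scan_results(results: Dict[str, List[int]]) -> List[str]:
--     """Identify high‑value targets based on open ports."""
--     targets = []
--     for ip, ports in results.items():
--         score = 0
--         if 445 in ports:
--             score += 3
--         if 3389 in ports:
--             score += 3
--         if 22 in ports:
--             score += 2
--         if 21 in ports:
--             score += 1
--         if score >= 3:
--             targets.append(ip)
--     return targets
-- ===== SOURCE B (Python) =====
-- from typing import List, Dict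
--
-- def analyze_scan_results(results: Dict[str, List[int]]) -> List[str]:
--     """Identify high-value targets based on open ports."""
--     # Staged passes: collect the set of IPs hit by each qualifying pattern
--     # (a weight-3 port, or the 22+21 combination), then emit hits in dict order.
--     hits = set()
--     hits.update(ip for ip, ports in results.items() if 445 in ports)
--     hits.update(ip for ip, ports in results.items() if 3389 in ports)
--     hits.update(ip for ip, ports in results.items() if 22 in ports and 21 in ports)
--     return [ip for ip in results if ip in hits]
-- ===== Notes on version B (the rewrite author's own statement) =====
-- stated objective: alternative
-- what changed: Replaces the single scoring loop by staged passes: three filters collect a set of qualifying IPs (445 hits, 3389 hits, 22+21 hits), then a final ordered pass over the keys emits set members; no score accumulator exists.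
import Mathlib
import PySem

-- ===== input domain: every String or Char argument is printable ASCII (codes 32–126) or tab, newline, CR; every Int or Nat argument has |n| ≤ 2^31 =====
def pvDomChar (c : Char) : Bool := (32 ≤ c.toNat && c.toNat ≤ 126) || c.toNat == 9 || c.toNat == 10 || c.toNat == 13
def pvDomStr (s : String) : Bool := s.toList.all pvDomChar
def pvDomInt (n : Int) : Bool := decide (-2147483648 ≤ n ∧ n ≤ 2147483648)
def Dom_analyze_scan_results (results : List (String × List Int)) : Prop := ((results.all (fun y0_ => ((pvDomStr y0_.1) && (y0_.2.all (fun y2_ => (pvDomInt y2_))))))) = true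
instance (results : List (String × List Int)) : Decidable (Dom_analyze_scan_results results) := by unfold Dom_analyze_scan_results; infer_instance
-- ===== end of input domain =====

-- B replaces A's single scoring loop by staged passes: three filters build a set of
-- qualifying IPs, then one ordered pass over the keys emits the set members (objective: alternative).

-- ===== PORT A =====
-- Port of A: fold over the dict items, accumulating a score then appending.
def analyze_scan_results (results : List (String × List Int)) : List String :=
  results.foldl (fun targets (p : String × List Int) =>
    let ip := p.1
    let ports := p.2
    let score : Int := 0
    let score := if (445 : Int) ∈ ports then score + 3 else score
    let score := if (3389 : Int) ∈ ports then score + 3 else score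
    let score := if (22 : Int) ∈ ports then score + 2 else score
    let score := if (21 : Int) ∈ ports then score + 1 else score
    if score ≥ 3 then targets ++ [ip] else targets) []

-- ===== PORT B =====
-- Port of B: three staged filter passes update a set of hit IPs; final pass over the keys.
def analyze_scan_results_alt (results : List (String × List Int)) : List String :=
  let hits : PySem.Set String := PySem.Set.empty
  let hits := PySem.Set.update hits
    ((results.filter (fun p => decide ((445 : Int) ∈ p.2))).map (fun p => p.1))
  let hits := PySem.Set.update hits
    ((results.filter (fun p => decide ((3389 : Int) ∈ p.2))).map (fun p => p.1))
  let hits := PySem.Set.update hits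
    ((results.filter (fun p => decide ((22 : Int) ∈ p.2) && decide ((21 : Int) ∈ p.2))).map (fun p => p.1))
  (results.map (fun p => p.1)).filter (fun ip => PySem.Set.contains hits ip)

-- ===== PRECONDITION & SPEC =====
-- Pre_ requires the IP keys to be pairwise distinct: the parameter is a Python dict, whose keys
-- are distinct by construction; the association-list encoding could otherwise carry duplicate
-- keys no dict can represent, a corner on which neither behaviour is specified.
def Pre_analyze_scan_results (results : List (String × List Int)) : Prop :=
  (results.map (fun p => p.1)).Nodup
instance (results : List (String × List Int)) : Decidable (Pre_analyze_scan_results results) := by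
  unfold Pre_analyze_scan_results; infer_instance

def pvWitness_analyze_scan_results : (List (String × List Int)) :=
  [("10.0.0.1", [445, 80]), ("10.0.0.2", [22, 21]), ("10.0.0.3", [22, 80])]

def Spec_analyze_scan_results (results : List (String × List Int)) (out : List String) : Prop := out = analyze_scan_results_alt results
instance (results : List (String × List Int)) (out : List String) : Decidable (Spec_analyze_scan_results results out) := by unfold Spec_analyze_scan_results; infer_instance

-- ===== CLAIM (what is proved, stated in full; the proofs are below) =====
def Claim_equal_analyze_scan_results : Prop := ∀ (results : List (String × List Int)), Dom_analyze_scan_results results → Pre_analyze_scan_results results → Spec_analyze_scan_results results (analyze_scan_results results)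

-- ===== LEMMAS AND PROOFS =====

-- score >= 3 in A's step iff 445 or 3389 open, or both 22 and 21.
def pvHighValue (ports : List Int) : Bool :=
  decide ((445 : Int) ∈ ports) || decide ((3389 : Int) ∈ ports) ||
    (decide ((22 : Int) ∈ ports) && decide ((21 : Int) ∈ ports))

-- A's fold with accumulator acc = acc ++ the high-value ips in order.
lemma pv_fold_eq (results : List (String × List Int)) (acc : List String) :
    results.foldl (fun targets (p : String × List Int) =>
      let ip := p.1
      let ports := p.2
      let score : Int := 0
      let score := if (445 : Int) ∈ ports then score + 3 else score
      let score := if (3389 : Int) ∈ ports then score + 3 else score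
      let score := if (22 : Int) ∈ ports then score + 2 else score
      let score := if (21 : Int) ∈ ports then score + 1 else score
      if score ≥ 3 then targets ++ [ip] else targets) acc
    = acc ++ (results.filter (fun p => pvHighValue p.2)).map (fun p => p.1) := by
  induction results generalizing acc with
  | nil => simp
  | cons p rest ih =>
    have hstep : ∀ (targets : List String),
        (let ip := p.1
         let ports := p.2
         let score : Int := 0
         let score := if (445 : Int) ∈ ports then score + 3 else score
         let score := if (3389 : Int) ∈ ports then score + 3 else score
         let score := if (22 : Int) ∈ ports then score + 2 else score
         let score := if (21 : Int) ∈ ports then score + 1 else score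
         if score ≥ 3 then targets ++ [ip] else targets)
        = if pvHighValue p.2 then targets ++ [p.1] else targets := by
      intro targets
      by_cases h445 : (445 : Int) ∈ p.2 <;> by_cases h3389 : (3389 : Int) ∈ p.2 <;>
        by_cases h22 : (22 : Int) ∈ p.2 <;> by_cases h21 : (21 : Int) ∈ p.2 <;>
        simp [pvHighValue, h445, h3389, h22, h21]
    rw [List.foldl_cons, hstep, List.filter_cons]
    by_cases h : pvHighValue p.2 = true
    · rw [if_pos h, ih]; simp [h]
    · rw [if_neg h, ih]; simp [h]

-- The hit set B builds (proof abbreviation; analyze_scan_results_alt unfolds to it by rfl).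
def pvHitSet (results : List (String × List Int)) : PySem.Set String :=
  PySem.Set.update (PySem.Set.update (PySem.Set.update (PySem.Set.empty)
    ((results.filter (fun p => decide ((445 : Int) ∈ p.2))).map (fun p => p.1)))
    ((results.filter (fun p => decide ((3389 : Int) ∈ p.2))).map (fun p => p.1)))
    ((results.filter (fun p => decide ((22 : Int) ∈ p.2) && decide ((21 : Int) ∈ p.2))).map (fun p => p.1))

-- Membership in B's hit set: some entry with this key is high-value.
lemma pv_mem_hits (results : List (String × List Int)) (ip : String) :
    PySem.Set.contains (pvHitSet results) ip = true
    ↔ ∃ p ∈ results, p.1 = ip ∧ pvHighValue p.2 = true := by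
  rw [PySem.Set.contains_iff]
  unfold pvHitSet
  simp only [PySem.Set.mem_update, List.mem_map, List.mem_filter, PySem.Set.empty,
    List.not_mem_nil, false_or, pvHighValue, Bool.or_eq_true, Bool.and_eq_true,
    decide_eq_true_eq]
  aesop

-- With distinct keys, filtering the keys through the hit set recovers the in-order selection.
lemma pv_keys_filter (results : List (String × List Int))
    (hnd : (results.map (fun p => p.1)).Nodup) :
    (results.map (fun p => p.1)).filter
      (fun ip => PySem.Set.contains (pvHitSet results) ip)
    = (results.filter (fun p => pvHighValue p.2)).map (fun p => p.1) := by
  induction results with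
  | nil => simp [pvHitSet]
  | cons q rest ih =>
    simp only [List.map_cons, List.nodup_cons] at hnd
    obtain ⟨hq, hrest⟩ := hnd
    rw [List.map_cons, List.filter_cons]
    have hhead : PySem.Set.contains (pvHitSet (q :: rest)) q.1 = pvHighValue q.2 := by
      by_cases h : pvHighValue q.2 = true
      · rw [h]
        exact (pv_mem_hits (q :: rest) q.1).mpr ⟨q, List.mem_cons_self, rfl, h⟩
      · rw [Bool.eq_false_iff.mpr h, Bool.eq_false_iff]
        intro hc
        obtain ⟨p, hp, hip, hhv⟩ := (pv_mem_hits (q :: rest) q.1).mp hc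
        rcases List.mem_cons.mp hp with rfl | hp'
        · exact h hhv
        · exact hq (List.mem_map.mpr ⟨p, hp', hip⟩)
    have htail :
        (rest.map (fun p => p.1)).filter
          (fun ip => PySem.Set.contains (pvHitSet (q :: rest)) ip)
        = (rest.filter (fun p => pvHighValue p.2)).map (fun p => p.1) := by
      rw [← ih hrest]
      apply List.filter_congr
      intro ip hip
      have hne : ip ≠ q.1 := by
        rintro rfl; exact hq hip
      by_cases h : (∃ p ∈ rest, p.1 = ip ∧ pvHighValue p.2 = true)
      · rw [(pv_mem_hits (q :: rest) ip).mpr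
             (by obtain ⟨p, hp, h1, h2⟩ := h; exact ⟨p, List.mem_cons_of_mem _ hp, h1, h2⟩),
           (pv_mem_hits rest ip).mpr h]
      · have h1 : ¬ (∃ p ∈ q :: rest, p.1 = ip ∧ pvHighValue p.2 = true) := by
          rintro ⟨p, hp, h1, h2⟩
          rcases List.mem_cons.mp hp with rfl | hp'
          · exact hne h1.symm
          · exact h ⟨p, hp', h1, h2⟩
        rw [Bool.eq_false_iff.mpr (fun hc => h1 ((pv_mem_hits (q :: rest) ip).mp hc)),
            Bool.eq_false_iff.mpr (fun hc => h ((pv_mem_hits rest ip).mp hc))]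
    rw [hhead, htail, List.filter_cons]
    by_cases h : pvHighValue q.2 = true <;> simp [h]

-- ===== VERDICT (by name: the statement is the Claim_ definition above) =====
theorem analyze_scan_results_spec : Claim_equal_analyze_scan_results := by
  intro results _ hpre
  unfold Spec_analyze_scan_results analyze_scan_results analyze_scan_results_alt
  rw [pv_fold_eq results []]
  simp only [List.nil_append]
  exact (pv_keys_filter results hpre).symm
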